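-- pv_equiv track=rewrite | github.com/appmlk/ConDefects | Code/arc170_b/Python/50477019/correctVersion.py | hantei
-- ===== SOURCE A (Python) =====
-- def hantei(lst):
--     seen = set()
--     out = set()
--     for i in range(len(lst)):
--         if lst[i] in out:
--             return 0
--         for s in seen:
--             # out.add(s+(s-lst[i]))
--             out.add(lst[i]+(lst[i]-s))
--         seen.add(lst[i])
--     return 1
-- ===== SOURCE B (Python) =====
-- def hantei(lst):
--     suffix = {}
--     for v in lst:
--         suffix[v] = suffix.get(v, 0) + 1
--     prefix = set()
--     for x in lst:
--         suffix[x] -= 1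
--         for v in prefix:
--             if suffix.get(2 * x - v, 0) > 0:
--                 return 0
--         prefix.add(x)
--     return 1
-- ===== Notes on version B (the rewrite author's own statement) =====
-- stated objective: alternative
-- what changed: Replaces A's forward-prediction scheme (a growing set of precomputed third terms 2*b-a for all earlier pairs, tested on each new element) with an element-as-middle scheme: a prefix set plus a suffix multiset counter, decrementing the current element before checking whether 2*x-v survives in the suffix for some prefix value v.
import Mathlib
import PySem

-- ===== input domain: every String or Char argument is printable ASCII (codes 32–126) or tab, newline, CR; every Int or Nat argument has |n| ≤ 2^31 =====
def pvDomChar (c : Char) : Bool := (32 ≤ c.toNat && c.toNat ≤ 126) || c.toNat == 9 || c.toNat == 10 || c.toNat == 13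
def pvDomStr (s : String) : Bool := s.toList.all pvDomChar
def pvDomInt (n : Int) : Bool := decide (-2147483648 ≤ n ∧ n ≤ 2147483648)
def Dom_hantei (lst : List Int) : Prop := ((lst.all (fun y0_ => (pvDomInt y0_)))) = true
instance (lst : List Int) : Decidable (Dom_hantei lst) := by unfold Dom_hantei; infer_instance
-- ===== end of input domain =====

-- B detects a 3-term arithmetic-progression subsequence with a prefix set plus a decremented
-- suffix counter (element-as-middle) instead of A's forward-predicted target set; objective:
-- alternative decomposition, same asymptotic cost.

-- ===== PORT A =====
-- A's loop: 'seen' = earlier values, 'out' = predicted third terms; return 0 on first hit.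
def hanteiLoopA (seen out : PySem.Set Int) : List Int → Int
  | [] => 1
  | x :: rest =>
    if x ∈ out then 0
    else hanteiLoopA (PySem.Set.add seen x)
      (seen.foldl (fun o s => PySem.Set.add o (x + (x - s))) out) rest

def hantei (lst : List Int) : Int :=
  hanteiLoopA PySem.Set.empty PySem.Set.empty lst

-- ===== PORT B =====
-- B's suffix counter: suffix[v] = suffix.get(v, 0) + 1 over lst
def hanteiCounter (lst : List Int) : PySem.Dict Int Int :=
  lst.foldl (fun d v => d.insert v (d.getD v 0 + 1)) PySem.Dict.empty

-- B's loop: decrement x out of the suffix, then test each prefix value v for 2*x - v in the suffix.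
def hanteiLoopB (pre : PySem.Set Int) (cnt : PySem.Dict Int Int) : List Int → Int
  | [] => 1
  | x :: rest =>
    let cnt' := cnt.insert x (cnt.getD x 0 - 1)
    if pre.any (fun v => decide ((0:Int) < cnt'.getD (2 * x - v) 0)) then 0
    else hanteiLoopB (PySem.Set.add pre x) cnt' rest

def hantei_alt (lst : List Int) : Int :=
  hanteiLoopB PySem.Set.empty (hanteiCounter lst) lst

-- ===== PRECONDITION & SPEC =====
def Spec_hantei (lst : List Int) (out : Int) : Prop := out = hantei_alt lst
instance (lst : List Int) (out : Int) : Decidable (Spec_hantei lst out) := by unfold Spec_hantei; infer_instance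

-- ===== CLAIM (what is proved, stated in full; the proofs are below) =====
def Claim_equal_hantei : Prop := ∀ (lst : List Int), Dom_hantei lst → Spec_hantei lst (hantei lst)

-- ===== LEMMAS AND PROOFS =====

-- 'twoOf a l' : some m occurs in l with 2*m - a occurring later (a, m, third term form an AP).
def twoOf (a : Int) : List Int → Bool
  | [] => false
  | m :: r => (2 * m - a) ∈ r || twoOf a r

-- 'hasAP l' : l has a 3-term arithmetic-progression subsequence.
def hasAP : List Int → Bool
  | [] => false
  | x :: r => twoOf x r || hasAP r

lemma loopA_eq (r : List Int) : ∀ (seen out : PySem.Set Int),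
    hanteiLoopA seen out r =
      (if (∃ t ∈ out, t ∈ r) ∨ (∃ s ∈ seen, twoOf s r = true) ∨ hasAP r = true then 0 else 1) := by
  induction r with
  | nil => intro seen out; simp [hanteiLoopA, hasAP, twoOf]
  | cons x r ih =>
    intro seen out
    by_cases hx : x ∈ out
    · rw [hanteiLoopA, if_pos hx, if_pos]
      exact Or.inl ⟨x, hx, List.mem_cons_self⟩
    · rw [hanteiLoopA, if_neg hx, ih]
      congr 1
      simp only [eq_iff_iff, List.mem_cons, PySem.Set.mem_foldl_add, PySem.Set.mem_add,
        twoOf, hasAP, Bool.or_eq_true, decide_eq_true_eq]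
      constructor
      · rintro (⟨t, (ht | ⟨s, hs, rfl⟩), htr⟩ | ⟨s, (hs | rfl), h2⟩ | h)
        · exact Or.inl ⟨t, ht, Or.inr htr⟩
        · refine Or.inr (Or.inl ⟨s, hs, Or.inl ?_⟩)
          have : 2 * x - s = x + (x - s) := by ring
          simpa [this] using htr
        · exact Or.inr (Or.inl ⟨s, hs, Or.inr h2⟩)
        · exact Or.inr (Or.inr (Or.inl h2))
        · exact Or.inr (Or.inr (Or.inr h))
      · rintro (⟨t, ht, (rfl | htr)⟩ | ⟨s, hs, (h2 | h2)⟩ | (h | h))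
        · exact absurd ht hx
        · exact Or.inl ⟨t, Or.inl ht, htr⟩
        · refine Or.inl ⟨x + (x - s), Or.inr ⟨s, hs, rfl⟩, ?_⟩
          have : x + (x - s) = 2 * x - s := by ring
          simpa [this] using h2
        · exact Or.inr (Or.inl ⟨s, Or.inl hs, h2⟩)
        · exact Or.inr (Or.inl ⟨x, Or.inr rfl, h⟩)
        · exact Or.inr (Or.inr h)

lemma loopB_eq (r : List Int) : ∀ (pre : PySem.Set Int) (cnt : PySem.Dict Int Int),
    (∀ v, cnt.getD v 0 = (r.count v : Int)) →
    hanteiLoopB pre cnt r =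
      (if (∃ v ∈ pre, twoOf v r = true) ∨ hasAP r = true then 0 else 1) := by
  induction r with
  | nil => intro pre cnt _; simp [hanteiLoopB, hasAP, twoOf]
  | cons x r ih =>
    intro pre cnt hc
    have hc' : ∀ v, (cnt.insert x (cnt.getD x 0 - 1)).getD v 0 = (r.count v : Int) := by
      intro v
      rw [PySem.Dict.getD_insert]
      by_cases hvx : v = x
      · subst hvx; rw [if_pos rfl, hc]; push_cast [List.count_cons]; simp
      · rw [if_neg hvx, hc]
        simp [Ne.symm hvx]
    have hcond : (pre.any (fun v =>
        decide ((0:Int) < (cnt.insert x (cnt.getD x 0 - 1)).getD (2 * x - v) 0)) = true)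
        ↔ ∃ v ∈ pre, (2 * x - v) ∈ r := by
      simp only [List.any_eq_true, decide_eq_true_eq]
      constructor
      · rintro ⟨v, hv, hpos⟩
        refine ⟨v, hv, ?_⟩
        rw [hc'] at hpos
        exact List.count_pos_iff.mp (by exact_mod_cast hpos)
      · rintro ⟨v, hv, hmem⟩
        refine ⟨v, hv, ?_⟩
        rw [hc']
        exact_mod_cast List.count_pos_iff.mpr hmem
    rw [hanteiLoopB]
    by_cases hs : ∃ v ∈ pre, (2 * x - v) ∈ r
    · rw [if_pos (hcond.mpr hs), if_pos]
      obtain ⟨v, hv, hmem⟩ := hs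
      refine Or.inl ⟨v, hv, ?_⟩
      simp [twoOf, hmem]
    · rw [if_neg (by simpa [hcond] using hs), ih _ _ hc']
      congr 1
      simp only [eq_iff_iff, PySem.Set.mem_add, twoOf, hasAP, Bool.or_eq_true, decide_eq_true_eq]
      constructor
      · rintro (⟨v, (hv | rfl), h2⟩ | h)
        · exact Or.inl ⟨v, hv, Or.inr h2⟩
        · exact Or.inr (Or.inl h2)
        · exact Or.inr (Or.inr h)
      · rintro (⟨v, hv, (h2 | h2)⟩ | (h | h))
        · exact absurd ⟨v, hv, h2⟩ hs
        · exact Or.inl ⟨v, Or.inl hv, h2⟩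
        · exact Or.inl ⟨x, Or.inr rfl, h⟩
        · exact Or.inr h

lemma counter_counts (lst : List Int) (v : Int) :
    (hanteiCounter lst).getD v 0 = (lst.count v : Int) := by
  unfold hanteiCounter
  rw [PySem.Dict.getD_foldl_insert_add_one]
  simp

-- ===== VERDICT (by name: the statement is the Claim_ definition above) =====
theorem hantei_spec : Claim_equal_hantei := by
  intro lst _
  unfold Spec_hantei hantei hantei_alt
  rw [loopA_eq, loopB_eq _ _ _ (counter_counts lst)]
  simp [PySem.Set.empty]
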